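-- pv_equiv track=rewrite | github.com/Das-rebel/ChuckleNet | benchmarks/standup4ai_word_level.py | extract_intervals
-- ===== SOURCE A (Python) =====
-- def extract_intervals(word_labels):
--     """Extract continuous laughter intervals from word labels"""
--     intervals = []
--     start = None
--
--     for i, label in enumerate(word_labels):
--         if label == 1 and start is None:
--             start = i
--         elif label == 0 and start is not None:
--             intervals.append((start, i - 1))
--             start = None
--
--     # Handle case where laughter continues to end
--     if start is not None:
--         intervals.append((start, len(word_labels) - 1))
--
--     return intervals
-- ===== SOURCE B (Python) =====
-- def extract_intervals(word_labels):
--     """Extract continuous laughter intervals from word labels"""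
--     # Pass 1: running "active" mask (active flips on at 1, off at 0, carries otherwise)
--     mask = []
--     active = False
--     for label in word_labels:
--         if label == 1:
--             active = True
--         elif label == 0:
--             active = False
--         mask.append(active)
--
--     # Pass 2: extract maximal runs of True from the mask
--     intervals = []
--     n = len(mask)
--     i = 0
--     while i < n:
--         if not mask[i]:
--             i += 1
--             continue
--         j = i + 1
--         while j < n and mask[j]:
--             j += 1
--         intervals.append((i, j - 1))
--         i = j
--     return intervals
-- ===== Notes on version B (the rewrite author's own statement) =====
-- stated objective: alternative
-- what changed: Replaces the inline interval-emitting state machine by a two-pass decomposition: a fold computes a boolean activity mask, then a separate run-extraction scan (outer skip / inner consume loops) emits the maximal True runs as inclusive intervals.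
import Mathlib
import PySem

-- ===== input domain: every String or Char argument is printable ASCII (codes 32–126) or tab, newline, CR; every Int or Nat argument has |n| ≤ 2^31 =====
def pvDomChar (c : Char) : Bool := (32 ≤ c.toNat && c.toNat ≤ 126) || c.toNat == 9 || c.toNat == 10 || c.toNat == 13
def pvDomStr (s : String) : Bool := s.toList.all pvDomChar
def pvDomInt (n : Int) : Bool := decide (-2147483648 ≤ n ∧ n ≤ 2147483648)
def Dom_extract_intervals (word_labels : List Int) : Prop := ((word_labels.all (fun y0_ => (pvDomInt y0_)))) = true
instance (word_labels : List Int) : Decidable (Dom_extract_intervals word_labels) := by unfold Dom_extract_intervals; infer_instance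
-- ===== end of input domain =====

-- B replaces A's inline interval-emitting state machine by a two-pass decomposition
-- (activity-mask fold, then maximal-run extraction); alternative structure, same cost.


-- ===== PORT A =====
-- literal transliteration of A: one enumerate loop over labels carrying (intervals, start, i),
-- then the trailing-run fix-up (start.getD 0 is only reached when start.isSome, as in the Python).
def extract_intervals (word_labels : List Int) : List (Int × Int) :=
  let st := word_labels.foldl
    (fun (s : List (Int × Int) × Option Int × Int) label =>
      let ints := s.1
      let start := s.2.1
      let i := s.2.2
      if label == 1 && start.isNone then (ints, some i, i + 1)
      else if label == 0 && start.isSome then (ints ++ [(start.getD 0, i - 1)], none, i + 1)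
      else (ints, start, i + 1))
    ([], none, 0)
  match st.2.1 with
  | some s => st.1 ++ [(s, (word_labels.length : Int) - 1)]
  | none => st.1

-- ===== PORT B =====
-- B's pass 2: outer scan skips False entries; inner scan consumes a run of True,
-- emitting (start, j-1) — a transcription of Source B's while loops as mutual recursion.
mutual
def runsFrom : List Bool → Int → List (Int × Int)
  | [], _ => []
  | b :: rest, i => if b then takeRun rest (i + 1) i else runsFrom rest (i + 1)
def takeRun : List Bool → Int → Int → List (Int × Int)
  | [], j, s => [(s, j - 1)]
  | b :: rest, j, s => if b then takeRun rest (j + 1) s else (s, j - 1) :: runsFrom rest (j + 1)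
end

-- literal transliteration of Source B: build the activity mask by a fold, then extract runs.
def extract_intervals_alt (word_labels : List Int) : List (Int × Int) :=
  let mask := (word_labels.foldl
    (fun (acc : List Bool × Bool) label =>
      let active := if label == 1 then true else if label == 0 then false else acc.2
      (acc.1 ++ [active], active)) ([], false)).1
  runsFrom mask 0

-- ===== PRECONDITION & SPEC =====
def Spec_extract_intervals (word_labels : List Int) (out : List (Int × Int)) : Prop := out = extract_intervals_alt word_labels
instance (word_labels : List Int) (out : List (Int × Int)) : Decidable (Spec_extract_intervals word_labels out) := by unfold Spec_extract_intervals; infer_instance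

-- ===== CLAIM (what is proved, stated in full; the proofs are below) =====
def Claim_equal_extract_intervals : Prop := ∀ (word_labels : List Int), Dom_extract_intervals word_labels → Spec_extract_intervals word_labels (extract_intervals word_labels)

-- ===== LEMMAS AND PROOFS =====

-- common reference function: the intervals of the suffix, given current index and open start
def ivSpec : List Int → Int → Option Int → List (Int × Int)
  | [], _, none => []
  | [], i, some s => [(s, i - 1)]
  | l :: rest, i, none =>
      if l == 1 then ivSpec rest (i + 1) (some i) else ivSpec rest (i + 1) none
  | l :: rest, i, some s =>
      if l == 0 then (s, i - 1) :: ivSpec rest (i + 1) none else ivSpec rest (i + 1) (some s)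

-- the mask Source B's first pass builds, functionally, and the final value of "active"
def maskOf : List Int → Bool → List Bool
  | [], _ => []
  | l :: rest, a =>
      let a' := if l == 1 then true else if l == 0 then false else a
      a' :: maskOf rest a'

def endAct : List Int → Bool → Bool
  | [], a => a
  | l :: rest, a => endAct rest (if l == 1 then true else if l == 0 then false else a)

lemma maskFold_eq : ∀ (ls : List Int) (m : List Bool) (a : Bool),
    ls.foldl (fun (acc : List Bool × Bool) label =>
      let active := if label == 1 then true else if label == 0 then false else acc.2
      (acc.1 ++ [active], active)) (m, a)
    = (m ++ maskOf ls a, endAct ls a) := by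
  intro ls
  induction ls with
  | nil => intro m a; simp [maskOf, endAct]
  | cons l rest ih =>
      intro m a
      simp only [List.foldl_cons, maskOf, endAct, ih]
      by_cases h1 : l = 1 <;> by_cases h0 : l = 0 <;>
        simp [h1, h0, List.append_assoc]

lemma foldA_spec : ∀ (ls : List Int) (ints : List (Int × Int)) (start : Option Int) (i : Int),
    (match (ls.foldl
      (fun (s : List (Int × Int) × Option Int × Int) label =>
        let ints := s.1
        let start := s.2.1
        let i := s.2.2
        if label == 1 && start.isNone then (ints, some i, i + 1)
        else if label == 0 && start.isSome then (ints ++ [(start.getD 0, i - 1)], none, i + 1)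
        else (ints, start, i + 1))
      (ints, start, i)).2.1 with
     | some s => (ls.foldl
      (fun (s : List (Int × Int) × Option Int × Int) label =>
        let ints := s.1
        let start := s.2.1
        let i := s.2.2
        if label == 1 && start.isNone then (ints, some i, i + 1)
        else if label == 0 && start.isSome then (ints ++ [(start.getD 0, i - 1)], none, i + 1)
        else (ints, start, i + 1))
      (ints, start, i)).1 ++ [(s, i + (ls.length : Int) - 1)]
     | none => (ls.foldl
      (fun (s : List (Int × Int) × Option Int × Int) label =>
        let ints := s.1
        let start := s.2.1
        let i := s.2.2
        if label == 1 && start.isNone then (ints, some i, i + 1)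
        else if label == 0 && start.isSome then (ints ++ [(start.getD 0, i - 1)], none, i + 1)
        else (ints, start, i + 1))
      (ints, start, i)).1)
    = ints ++ ivSpec ls i start := by
  intro ls
  induction ls with
  | nil =>
      intro ints start i
      cases start <;> simp [ivSpec]
  | cons l rest ih =>
      intro ints start i
      simp only [List.foldl_cons]
      cases start with
      | none =>
          by_cases h1 : l = 1
          · simpa [h1, ivSpec, List.length_cons, add_sub_assoc, add_assoc, add_comm,
              add_left_comm] using ih ints (some i) (i + 1)
          · simpa [h1, ivSpec, add_sub_assoc, add_assoc, add_comm, add_left_comm]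
              using ih ints none (i + 1)
      | some v =>
          by_cases h0 : l = 0
          · have := ih (ints ++ [(v, i - 1)]) none (i + 1)
            simp only [List.append_assoc] at this
            simpa [h0, ivSpec, add_sub_assoc, add_assoc, add_comm, add_left_comm] using this
          · have h1 : ¬(l == 1 && (Option.isNone (some v)) = true) := by simp
            simpa [h0, ivSpec, add_sub_assoc, add_assoc, add_comm, add_left_comm]
              using ih ints (some v) (i + 1)

lemma runs_spec : ∀ (ls : List Int) (i : Int),
    runsFrom (maskOf ls false) i = ivSpec ls i none
    ∧ ∀ s : Int, takeRun (maskOf ls true) i s = ivSpec ls i (some s) := by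
  intro ls
  induction ls with
  | nil => intro i; constructor <;> simp [maskOf, runsFrom, takeRun, ivSpec]
  | cons l rest ih =>
      intro i
      constructor
      · by_cases h1 : l = 1
        · simp [maskOf, runsFrom, h1, ivSpec, (ih (i + 1)).2 i]
        · by_cases h0 : l = 0 <;>
            simp [maskOf, runsFrom, h1, h0, ivSpec, (ih (i + 1)).1]
      · intro s
        by_cases h0 : l = 0
        · simp [maskOf, takeRun, h0, ivSpec, (ih (i + 1)).1]
        · by_cases h1 : l = 1 <;>
            simp [maskOf, takeRun, h1, h0, ivSpec, (ih (i + 1)).2 s]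

-- ===== VERDICT (by name: the statement is the Claim_ definition above) =====
theorem extract_intervals_spec : Claim_equal_extract_intervals := by
  intro ls _
  unfold Spec_extract_intervals extract_intervals extract_intervals_alt
  rw [maskFold_eq]
  have hA := foldA_spec ls [] none 0
  simp only [List.nil_append, zero_add] at hA
  simp only [List.nil_append]
  rw [(runs_spec ls 0).1, ← hA]
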